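-- pv_equiv track=rewrite | github.com/obeleh/codur | codur/graph/nodes/planning/tool_analysis.py | pick_preferred_python_file
-- ===== SOURCE A (Python) =====
-- def pick_preferred_python_file(files: list[str]) -> str | None:
--     """Pick the most likely main Python file from a list."""
--     if not files:
--         return None
--     py_files = [path for path in files if path.endswith(".py")]
--     if not py_files:
--         return None
--     for preferred in ("app.py", "main.py"):
--         if preferred in py_files:
--             return preferred
--     for preferred in ("app.py", "main.py"):
--         matches = [path for path in py_files if path.endswith(f"/{preferred}")]
--         if matches:
--             return min(matches, key=lambda p: (p.count("/"), len(p)))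
--     if len(py_files) == 1:
--         return py_files[0]
--     return min(py_files, key=lambda p: (p.count("/"), len(p)))
-- ===== SOURCE B (Python) =====
-- def pick_preferred_python_file(files: list[str]) -> str | None:
--     """Pick the most likely main Python file: one ranking key + a single min."""
--     if not files:
--         return None
--     py_files = [p for p in files if p.endswith(".py")]
--     if not py_files:
--         return None
--
--     def tier(p: str) -> int:
--         if p == "app.py":
--             return 0
--         if p == "main.py":
--             return 1
--         if p.endswith("/app.py"):
--             return 2
--         if p.endswith("/main.py"):
--             return 3
--         return 4
--
--     return min(py_files, key=lambda p: (tier(p), p.count("/"), len(p)))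
-- ===== Notes on version B (the rewrite author's own statement) =====
-- stated objective: simpler
-- what changed: A's four-stage cascade of membership tests, filters and per-stage mins is collapsed into one priority-tier function and a single min over py_files with the lexicographic key (tier, slash count, length).
import Mathlib
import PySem

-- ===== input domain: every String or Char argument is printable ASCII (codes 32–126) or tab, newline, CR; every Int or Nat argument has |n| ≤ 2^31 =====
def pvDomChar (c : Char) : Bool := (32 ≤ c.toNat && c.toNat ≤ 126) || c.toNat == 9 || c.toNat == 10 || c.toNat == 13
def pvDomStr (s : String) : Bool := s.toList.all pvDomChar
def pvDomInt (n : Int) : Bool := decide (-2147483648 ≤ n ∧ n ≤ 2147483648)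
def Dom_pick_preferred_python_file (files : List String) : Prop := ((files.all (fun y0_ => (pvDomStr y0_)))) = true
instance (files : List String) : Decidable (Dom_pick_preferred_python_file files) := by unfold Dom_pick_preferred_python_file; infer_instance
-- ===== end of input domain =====

-- B collapses A's four-stage filter-and-return cascade into one priority-tier key and a single min (objective: simpler).

-- ===== PORT A =====
def pick_preferred_python_file (files : List String) : Option String :=
  if files = [] then none
  else
    let py_files := files.filter (fun p => PySem.Str.endswith p ".py")
    if py_files = [] then none
    else if py_files.contains "app.py" then some "app.py"
    else if py_files.contains "main.py" then some "main.py"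
    else
      let m1 := py_files.filter (fun p => PySem.Str.endswith p "/app.py")
      if m1 ≠ [] then
        PySem.List.min2? m1 (fun p => PySem.Str.count p "/") (fun p => PySem.Str.len p)
      else
        let m2 := py_files.filter (fun p => PySem.Str.endswith p "/main.py")
        if m2 ≠ [] then
          PySem.List.min2? m2 (fun p => PySem.Str.count p "/") (fun p => PySem.Str.len p)
        else if py_files.length = 1 then PySem.List.pyGet? py_files 0
        else PySem.List.min2? py_files (fun p => PySem.Str.count p "/") (fun p => PySem.Str.len p)

-- ===== PORT B =====
def pvTier (p : String) : Nat :=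
  if p = "app.py" then 0
  else if p = "main.py" then 1
  else if PySem.Str.endswith p "/app.py" then 2
  else if PySem.Str.endswith p "/main.py" then 3
  else 4

-- Python's 3-tuple key comparison, written out lexicographically (exact)
def pvKeyLt (p m : String) : Bool :=
  pvTier p < pvTier m ||
    (pvTier p == pvTier m &&
      (PySem.Str.count p "/" < PySem.Str.count m "/" ||
        (PySem.Str.count p "/" == PySem.Str.count m "/" && PySem.Str.len p < PySem.Str.len m)))

-- min(py_files, key=...): the first element whose key is minimal
def pvMin3 (xs : List String) : Option String :=
  xs.foldl (fun acc x =>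
    match acc with
    | none => some x
    | some m => if pvKeyLt x m then some x else some m) none

def pick_preferred_python_file_alt (files : List String) : Option String :=
  if files = [] then none
  else
    let py_files := files.filter (fun p => PySem.Str.endswith p ".py")
    if py_files = [] then none
    else pvMin3 py_files

-- ===== PRECONDITION & SPEC =====
def Spec_pick_preferred_python_file (files : List String) (out : Option String) : Prop := out = pick_preferred_python_file_alt files
instance (files : List String) (out : Option String) : Decidable (Spec_pick_preferred_python_file files out) := by unfold Spec_pick_preferred_python_file; infer_instance

-- ===== CLAIM (what is proved, stated in full; the proofs are below) =====
def Claim_equal_pick_preferred_python_file : Prop := ∀ (files : List String), Dom_pick_preferred_python_file files → Spec_pick_preferred_python_file files (pick_preferred_python_file files)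

-- ===== LEMMAS AND PROOFS =====

-- the step of a min-with-key fold
def pvStep {κ : Type} [LT κ] [DecidableLT κ] (key : String → κ) (acc : Option String) (x : String) : Option String :=
  match acc with
  | none => some x
  | some m => if key x < key m then some x else some m

lemma min?_eq_foldl_pvStep {κ : Type} [LT κ] [DecidableLT κ] (xs : List String) (key : String → κ) :
    PySem.List.min? xs key = xs.foldl (pvStep key) none := by
  unfold PySem.List.min?
  congr 1
  funext acc x
  cases acc <;> rfl

lemma min2?_eq_min_lex {κ₁ κ₂ : Type} [LinearOrder κ₁] [LinearOrder κ₂]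
    (xs : List String) (k1 : String → κ₁) (k2 : String → κ₂) :
    PySem.List.min2? xs k1 k2 = PySem.List.min? xs (fun x => toLex (k1 x, k2 x)) := by
  unfold PySem.List.min2? PySem.List.min?
  congr 1
  funext acc x
  cases acc with
  | none => rfl
  | some m =>
    simp only [Prod.Lex.toLex_lt_toLex]
    rcases lt_trichotomy (k1 x) (k1 m) with h | h | h <;>
      by_cases h2 : k2 x < k2 m
    · simp [h]
    · simp [h]
    · simp [h, h2]
    · simp [h, h2]
    · have h' : ¬ k1 x < k1 m := not_lt_of_gt h
      have h'' : k1 x ≠ k1 m := ne_of_gt h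
      simp [h, h', h'', h2]
    · have h' : ¬ k1 x < k1 m := not_lt_of_gt h
      have h'' : k1 x ≠ k1 m := ne_of_gt h
      simp [h, h', h'', h2]

-- paired-fold invariant: the lex-min fold over xs and the k2-min fold over the tier-t filter agree
lemma pvAux {κ : Type} [LinearOrder κ] (k1 : String → Nat) (k2 : String → κ) (t : Nat) :
    ∀ (xs : List String) (acc acc2 : Option String),
      (∀ x ∈ xs, t ≤ k1 x) →
      ((acc2 = none ∧ (acc = none ∨ ∃ m, acc = some m ∧ t < k1 m)) ∨
        (∃ m, acc = some m ∧ acc2 = some m ∧ k1 m = t)) →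
      ((xs.foldl (pvStep (fun x => toLex (k1 x, k2 x))) acc
          = (xs.filter (fun x => k1 x == t)).foldl (pvStep k2) acc2 ∧
        ∃ m, (xs.filter (fun x => k1 x == t)).foldl (pvStep k2) acc2 = some m ∧ k1 m = t) ∨
       ((xs.filter (fun x => k1 x == t)).foldl (pvStep k2) acc2 = none ∧
        (xs.foldl (pvStep (fun x => toLex (k1 x, k2 x))) acc = none ∨
         ∃ m, xs.foldl (pvStep (fun x => toLex (k1 x, k2 x))) acc = some m ∧ t < k1 m))) := by
  intro xs
  induction xs with
  | nil =>
    intro acc acc2 hmin hR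
    simp only [List.foldl_nil, List.filter_nil]
    rcases hR with ⟨h2, hc⟩ | ⟨m, ha, h2, ht⟩
    · exact Or.inr ⟨h2, hc⟩
    · exact Or.inl ⟨ha.trans h2.symm, m, h2, ht⟩
  | cons x xs ih =>
    intro acc acc2 hmin hR
    have hx : t ≤ k1 x := hmin x (by simp)
    have hmin' : ∀ y ∈ xs, t ≤ k1 y := fun y hy => hmin y (by simp [hy])
    simp only [List.foldl_cons, List.filter_cons]
    by_cases hxt : k1 x = t
    · have hb : (k1 x == t) = true := by simp [hxt]
      rw [hb]
      simp only []
      apply ih _ _ hmin'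
      rcases hR with ⟨h2, hc⟩ | ⟨m, ha, h2, ht⟩
      · subst h2
        rcases hc with rfl | ⟨m, rfl, hm⟩
        · exact Or.inr ⟨x, rfl, rfl, hxt⟩
        · have hcond : toLex (k1 x, k2 x) < toLex (k1 m, k2 m) := by
            rw [Prod.Lex.toLex_lt_toLex]; exact Or.inl (hxt ▸ hm)
          exact Or.inr ⟨x, by simp [pvStep, hcond], rfl, hxt⟩
      · subst ha; subst h2
        by_cases hk : k2 x < k2 m
        · have hcond : toLex (k1 x, k2 x) < toLex (k1 m, k2 m) := by
            rw [Prod.Lex.toLex_lt_toLex]; exact Or.inr ⟨by rw [hxt, ht], hk⟩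
          exact Or.inr ⟨x, by simp [pvStep, hcond], by simp [pvStep, hk], hxt⟩
        · have hcond : ¬ toLex (k1 x, k2 x) < toLex (k1 m, k2 m) := by
            rw [Prod.Lex.toLex_lt_toLex]
            rintro (h | ⟨h1, h2⟩)
            · simp only at h; omega
            · exact hk h2
          exact Or.inr ⟨m, by simp [pvStep, hcond], by simp [pvStep, hk], ht⟩
    · have hlt : t < k1 x := lt_of_le_of_ne hx (fun h => hxt h.symm)
      have hb : (k1 x == t) = false := by simp [hxt]
      rw [hb]
      simp only [Bool.false_eq_true, if_false]
      apply ih _ _ hmin'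
      rcases hR with ⟨h2, hc⟩ | ⟨m, ha, h2, ht⟩
      · subst h2
        refine Or.inl ⟨rfl, ?_⟩
        rcases hc with rfl | ⟨m, rfl, hm⟩
        · exact Or.inr ⟨x, rfl, hlt⟩
        · by_cases hcond : toLex (k1 x, k2 x) < toLex (k1 m, k2 m)
          · exact Or.inr ⟨x, by simp [pvStep, hcond], hlt⟩
          · exact Or.inr ⟨m, by simp [pvStep, hcond], hm⟩
      · subst ha; subst h2
        have hcond : ¬ toLex (k1 x, k2 x) < toLex (k1 m, k2 m) := by
          rw [Prod.Lex.toLex_lt_toLex]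
          rintro (h | ⟨h1, h2⟩)
          · simp only at h; omega
          · simp only at h1; omega
        exact Or.inr ⟨m, by simp [pvStep, hcond], rfl, ht⟩

lemma min_lex_filter {κ : Type} [LinearOrder κ] (k1 : String → Nat) (k2 : String → κ) (t : Nat)
    (xs : List String) (hex : ∃ x ∈ xs, k1 x = t) (hmin : ∀ x ∈ xs, t ≤ k1 x) :
    PySem.List.min? xs (fun x => toLex (k1 x, k2 x)) = PySem.List.min? (xs.filter (fun x => k1 x == t)) k2 := by
  rw [min?_eq_foldl_pvStep, min?_eq_foldl_pvStep]
  rcases pvAux k1 k2 t xs none none hmin (Or.inl ⟨rfl, Or.inl rfl⟩) with ⟨heq, _⟩ | ⟨hnone, _⟩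
  · exact heq
  · exfalso
    have h0 : PySem.List.min? (xs.filter (fun x => k1 x == t)) k2 = none := by
      rw [min?_eq_foldl_pvStep]; exact hnone
    rw [PySem.List.min?_eq_none_iff] at h0
    rcases hex with ⟨y, hy, hyt⟩
    have : y ∈ xs.filter (fun x => k1 x == t) := List.mem_filter.mpr ⟨hy, by simp [hyt]⟩
    rw [h0] at this
    exact absurd this (List.not_mem_nil)


lemma pvTier_eq_zero (p : String) : pvTier p = 0 ↔ p = "app.py" := by
  unfold pvTier; split_ifs <;> simp_all

lemma pvTier_eq_one (p : String) : pvTier p = 1 ↔ p = "main.py" := by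
  unfold pvTier; split_ifs <;> simp_all

lemma ends_app_tier (p : String) (h : PySem.Str.endswith p "/app.py" = true) : pvTier p = 2 := by
  have h1 : p ≠ "app.py" := by rintro rfl; exact absurd h (by decide)
  have h2 : p ≠ "main.py" := by rintro rfl; exact absurd h (by decide)
  simp only [pvTier, if_neg h1, if_neg h2]
  simp at h
  simp [h]

lemma tier_two_ends (p : String) (h : pvTier p = 2) : PySem.Str.endswith p "/app.py" = true := by
  unfold pvTier at h; split_ifs at h <;> simp_all

lemma ends_main_tier (p : String) (h : PySem.Str.endswith p "/main.py" = true)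
    (h3 : PySem.Str.endswith p "/app.py" = false) : pvTier p = 3 := by
  have h1 : p ≠ "app.py" := by rintro rfl; exact absurd h (by decide)
  have h2 : p ≠ "main.py" := by rintro rfl; exact absurd h (by decide)
  simp only [pvTier, if_neg h1, if_neg h2]
  simp at h h3
  simp [h, h3]

lemma tier_three_ends (p : String) (h : pvTier p = 3) : PySem.Str.endswith p "/main.py" = true := by
  unfold pvTier at h; split_ifs at h <;> simp_all

lemma pvTier_eq_four (p : String) (h1 : p ≠ "app.py") (h2 : p ≠ "main.py")
    (h3 : PySem.Str.endswith p "/app.py" = false) (h4 : PySem.Str.endswith p "/main.py" = false) :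
    pvTier p = 4 := by
  simp only [pvTier, if_neg h1, if_neg h2]
  simp at h3 h4
  simp [h3, h4]

lemma pvMin3_eq (xs : List String) :
    pvMin3 xs = PySem.List.min? xs
      (fun x => toLex (pvTier x, ((fun p => toLex (PySem.Str.count p "/", PySem.Str.len p)) x : Nat ×ₗ Int))) := by
  unfold pvMin3 PySem.List.min?
  congr 1
  funext acc x
  cases acc with
  | none => rfl
  | some m =>
    apply if_congr ?_ rfl rfl
    simp only [pvKeyLt, Prod.Lex.toLex_lt_toLex, Bool.or_eq_true, Bool.and_eq_true,
      decide_eq_true_eq, beq_iff_eq]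

lemma min?_const {κ : Type} [LT κ] [DecidableLT κ] (ys : List String) (k : String → κ) (c : String)
    (hne : ys ≠ []) (hall : ∀ y ∈ ys, y = c) : PySem.List.min? ys k = some c := by
  cases hm : PySem.List.min? ys k with
  | none => exact absurd ((PySem.List.min?_eq_none_iff ys k).mp hm) hne
  | some m => rw [hall m (PySem.List.min?_mem hm)]

-- ===== VERDICT (by name: the statement is the Claim_ definition above) =====
theorem pick_preferred_python_file_spec : Claim_equal_pick_preferred_python_file := by
  intro files _
  unfold Spec_pick_preferred_python_file pick_preferred_python_file pick_preferred_python_file_alt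
  by_cases hf : files = []
  · simp [hf]
  simp only [if_neg hf]
  set py := files.filter (fun p => PySem.Str.endswith p ".py") with hpy
  by_cases hpe : py = []
  · simp [hpe]
  simp only [if_neg hpe]
  rw [pvMin3_eq]
  by_cases happ : py.contains "app.py"
  · simp only [if_pos happ]
    have hmem : "app.py" ∈ py := by simpa using happ
    rw [min_lex_filter pvTier _ 0 py ⟨"app.py", hmem, by decide⟩ (fun x _ => Nat.zero_le _)]
    symm
    apply min?_const
    · intro hnil
      have : "app.py" ∈ py.filter (fun x => pvTier x == 0) :=
        List.mem_filter.mpr ⟨hmem, by decide⟩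
      rw [hnil] at this; exact absurd this List.not_mem_nil
    · intro y hy
      have := (List.mem_filter.mp hy).2
      exact (pvTier_eq_zero y).mp (by simpa using this)
  have happ' : "app.py" ∉ py := by simpa using happ
  have hmin1 : ∀ x ∈ py, 1 ≤ pvTier x := by
    intro x hx
    by_contra hc
    have h0 : pvTier x = 0 := by omega
    exact happ' ((pvTier_eq_zero x).mp h0 ▸ hx)
  by_cases hmain : py.contains "main.py"
  · simp only [if_pos hmain, if_neg happ]
    have hmem : "main.py" ∈ py := by simpa using hmain
    rw [min_lex_filter pvTier _ 1 py ⟨"main.py", hmem, by decide⟩ hmin1]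
    symm
    apply min?_const
    · intro hnil
      have : "main.py" ∈ py.filter (fun x => pvTier x == 1) :=
        List.mem_filter.mpr ⟨hmem, by decide⟩
      rw [hnil] at this; exact absurd this List.not_mem_nil
    · intro y hy
      have := (List.mem_filter.mp hy).2
      exact (pvTier_eq_one y).mp (by simpa using this)
  have hmain' : "main.py" ∉ py := by simpa using hmain
  have hne_app : ∀ x ∈ py, x ≠ "app.py" := fun x hx h => happ' (h ▸ hx)
  have hne_main : ∀ x ∈ py, x ≠ "main.py" := fun x hx h => hmain' (h ▸ hx)
  have hmin2 : ∀ x ∈ py, 2 ≤ pvTier x := by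
    intro x hx
    have h1 := hmin1 x hx
    by_contra hc
    have h0 : pvTier x = 1 := by omega
    exact hne_main x hx ((pvTier_eq_one x).mp h0)
  simp only [if_neg happ, if_neg hmain]
  by_cases h1 : py.filter (fun p => PySem.Str.endswith p "/app.py") = []
  · have hmin3 : ∀ x ∈ py, 3 ≤ pvTier x := by
      intro x hx
      have h2 := hmin2 x hx
      by_contra hc
      have h0 : pvTier x = 2 := by omega
      have he := tier_two_ends x h0
      have : x ∈ py.filter (fun p => PySem.Str.endswith p "/app.py") := List.mem_filter.mpr ⟨hx, he⟩
      rw [h1] at this; exact absurd this List.not_mem_nil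
    have hnoapp : ∀ x ∈ py, PySem.Str.endswith x "/app.py" = false := by
      intro x hx
      by_contra hc
      have he : PySem.Str.endswith x "/app.py" = true := by
        cases h : PySem.Str.endswith x "/app.py" with
        | true => rfl
        | false => exact absurd h hc
      have : x ∈ py.filter (fun p => PySem.Str.endswith p "/app.py") := List.mem_filter.mpr ⟨hx, he⟩
      rw [h1] at this; exact absurd this List.not_mem_nil
    by_cases h2 : py.filter (fun p => PySem.Str.endswith p "/main.py") = []
    · -- all tier 4
      have hall4 : ∀ x ∈ py, pvTier x = 4 := by
        intro x hx
        have hnomain : PySem.Str.endswith x "/main.py" = false := by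
          by_contra hc
          have he : PySem.Str.endswith x "/main.py" = true := by
            cases h : PySem.Str.endswith x "/main.py" with
            | true => rfl
            | false => exact absurd h hc
          have : x ∈ py.filter (fun p => PySem.Str.endswith p "/main.py") := List.mem_filter.mpr ⟨hx, he⟩
          rw [h2] at this; exact absurd this List.not_mem_nil
        exact pvTier_eq_four x (hne_app x hx) (hne_main x hx) (hnoapp x hx) hnomain
      obtain ⟨x0, hx0⟩ := List.exists_mem_of_ne_nil py hpe
      rw [min_lex_filter pvTier _ 4 py ⟨x0, hx0, hall4 x0 hx0⟩ (fun x hx => (hall4 x hx).ge)]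
      rw [show py.filter (fun x => pvTier x == 4) = py from
        List.filter_eq_self.mpr (fun x hx => by simp [hall4 x hx])]
      rw [← min2?_eq_min_lex]
      simp only [if_neg (not_not_intro h1), if_neg (not_not_intro h2)]
      by_cases hlen : py.length = 1
      · obtain ⟨a, ha⟩ := List.length_eq_one_iff.mp hlen
        rw [if_pos hlen, ha]
        simp [PySem.List.pyGet?, PySem.List.pyIdx?, PySem.List.min2?]
      · rw [if_neg hlen]
    · -- tier 3 stage
      simp only [if_neg (not_not_intro h1), if_pos h2]  -- A's `if m2 ≠ []` branch
      obtain ⟨x0, hx0⟩ := List.exists_mem_of_ne_nil _ h2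
      have hx0py := (List.mem_filter.mp hx0).1
      have hx0e : PySem.Str.endswith x0 "/main.py" = true := (List.mem_filter.mp hx0).2
      rw [min_lex_filter pvTier _ 3 py ⟨x0, hx0py, ends_main_tier x0 hx0e (hnoapp x0 hx0py)⟩ hmin3]
      rw [show py.filter (fun x => pvTier x == 3) = py.filter (fun p => PySem.Str.endswith p "/main.py") from
        List.filter_congr (by
          intro x hx
          cases he : PySem.Str.endswith x "/main.py" with
          | true => simp [ends_main_tier x he (hnoapp x hx)]
          | false =>
            have : pvTier x ≠ 3 := fun h => by rw [tier_three_ends x h] at he; cases he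
            simp [this])]
      rw [← min2?_eq_min_lex]
  · -- tier 2 stage
    simp only [if_pos h1]
    obtain ⟨x0, hx0⟩ := List.exists_mem_of_ne_nil _ h1
    have hx0py := (List.mem_filter.mp hx0).1
    have hx0e : PySem.Str.endswith x0 "/app.py" = true := (List.mem_filter.mp hx0).2
    rw [min_lex_filter pvTier _ 2 py ⟨x0, hx0py, ends_app_tier x0 hx0e⟩ hmin2]
    rw [show py.filter (fun x => pvTier x == 2) = py.filter (fun p => PySem.Str.endswith p "/app.py") from
      List.filter_congr (by
        intro x hx
        cases he : PySem.Str.endswith x "/app.py" with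
        | true => simp [ends_app_tier x he]
        | false =>
          have : pvTier x ≠ 2 := fun h => by rw [tier_two_ends x h] at he; cases he
          simp [this])]
    rw [← min2?_eq_min_lex]
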